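-- pv_equiv track=rewrite | github.com/EdwardAstill/foxpilot | src/foxpilot/sites/docs_service.py | _clean_multiline
-- ===== SOURCE A (Python) =====
-- def _clean_multiline(value: str) -> str:
--     lines = [line.rstrip() for line in value.splitlines()]
--     compacted: list[str] = []
--     previous_blank = False
--     for line in lines:
--         blank = not line.strip()
--         if blank and previous_blank:
--             continue
--         compacted.append(line.strip() if blank else line)
--         previous_blank = blank
--     return "\n".join(compacted).strip()
-- ===== SOURCE B (Python) =====
-- import re
--
--
-- def _clean_multiline(value: str) -> str:
--     # Build the rstripped text once, then collapse any run of blank lines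
--     # (>= 2 consecutive newlines) to a single blank line with one regex pass.
--     text = "\n".join(line.rstrip() for line in value.splitlines())
--     return re.sub(r"\n{2,}", "\n\n", text).strip()
-- ===== Notes on version B (the rewrite author's own statement) =====
-- stated objective: idiomatic
-- what changed: Replaces the stateful previous_blank/compacted loop by joining the rstripped lines into one string and collapsing every run of two or more consecutive newlines to a single blank line with one regex substitution, then stripping the result.
import Mathlib
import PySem

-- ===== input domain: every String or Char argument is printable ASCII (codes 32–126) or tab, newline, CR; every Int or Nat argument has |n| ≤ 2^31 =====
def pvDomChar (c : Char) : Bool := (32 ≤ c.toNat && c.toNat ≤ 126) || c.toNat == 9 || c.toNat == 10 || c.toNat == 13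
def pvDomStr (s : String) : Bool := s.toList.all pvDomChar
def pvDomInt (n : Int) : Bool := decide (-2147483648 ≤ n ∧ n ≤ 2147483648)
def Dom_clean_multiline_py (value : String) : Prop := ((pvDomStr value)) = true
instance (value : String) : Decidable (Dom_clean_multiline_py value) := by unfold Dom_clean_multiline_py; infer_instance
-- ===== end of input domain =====

-- B replaces A's stateful blank-collapsing loop by building the rstripped text
-- once and collapsing every run of >= 2 newlines with one regex substitution
-- (idiomatic; the Lean port implements that substitution exactly).


-- ===== PORT A =====
-- A's loop body: state = (compacted, previous_blank)
def cleanStepA (st : List (List Char) × Bool) (line : List Char) : List (List Char) × Bool :=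
  let blank := (PySem.Chars.strip line).isEmpty
  if blank && st.2 then st
  else (st.1 ++ [if blank then PySem.Chars.strip line else line], blank)

def clean_multiline_py (value : String) : String :=
  let lines := (PySem.Chars.splitlines value.toList).map PySem.Chars.rstrip
  let st := lines.foldl cleanStepA ([], false)
  String.ofList (PySem.Chars.strip (PySem.Chars.join ['\n'] st.1))

-- ===== PORT B =====
-- Exact port of re.sub(r"\n{2,}", "\n\n", s): k is the length of the current
-- newline run seen so far; newlines beyond the second of a run are dropped.
def collapseNL : List Char → Nat → List Char
  | [], _ => []
  | c :: s, k =>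
    if c = '\n' then
      if 2 ≤ k then collapseNL s k else '\n' :: collapseNL s (k + 1)
    else c :: collapseNL s 0

def clean_multiline_py_alt (value : String) : String :=
  let text := PySem.Chars.join ['\n'] ((PySem.Chars.splitlines value.toList).map PySem.Chars.rstrip)
  String.ofList (PySem.Chars.strip (collapseNL text 0))

-- ===== PRECONDITION & SPEC =====
def Spec_clean_multiline_py (value : String) (out : String) : Prop := out = clean_multiline_py_alt value
instance (value : String) (out : String) : Decidable (Spec_clean_multiline_py value out) := by unfold Spec_clean_multiline_py; infer_instance

-- ===== CLAIM (what is proved, stated in full; the proofs are below) =====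
def Claim_equal_clean_multiline_py : Prop := ∀ (value : String), Dom_clean_multiline_py value → Spec_clean_multiline_py value (clean_multiline_py value)

-- ===== LEMMAS AND PROOFS =====

-- membership helpers for dropWhile
lemma mem_of_dropWhile {α : Type} {p : α → Bool} {c : α} {l : List α}
    (h : c ∈ l.dropWhile p) : c ∈ l :=
  (List.dropWhile_sublist p).subset h

lemma mem_dropWhile_of_neg {α : Type} {p : α → Bool} {c : α} {l : List α}
    (hp : p c = false) (hc : c ∈ l) : c ∈ l.dropWhile p := by
  induction l with
  | nil => cases hc
  | cons a t ih =>
    rcases List.mem_cons.mp hc with rfl | hct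
    · simp [List.dropWhile_cons, hp]
    · by_cases ha : p a
      · simpa [List.dropWhile_cons, ha] using ih hct
      · simp [List.dropWhile_cons, ha, List.mem_cons, hct]

lemma rstrip_eq_nil_iff (l : List Char) :
    PySem.Chars.rstrip l = [] ↔ ∀ c ∈ l, PySem.Chars.isspace c = true := by
  simp [PySem.Chars.rstrip, List.dropWhile_eq_nil_iff]

lemma strip_eq_nil_iff (l : List Char) :
    PySem.Chars.strip l = [] ↔ ∀ c ∈ l, PySem.Chars.isspace c = true := by
  rw [PySem.Chars.strip, rstrip_eq_nil_iff]
  constructor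
  · intro h c hc
    by_cases hs : PySem.Chars.isspace c = true
    · exact hs
    · exact absurd (h c (mem_dropWhile_of_neg (by simpa using hs) hc)) (by simp [hs])
  · intro h c hc
    exact h c (mem_of_dropWhile (by simpa [PySem.Chars.lstrip] using hc))

lemma dropWhile_dropWhile {α : Type} (p : α → Bool) (l : List α) :
    List.dropWhile p (List.dropWhile p l) = List.dropWhile p l := by
  rcases hd : List.dropWhile p l with _ | ⟨a, t⟩
  · rfl
  · have ha : p a = false := by
      have := List.head_dropWhile_not p (l := l) (by simp [hd])
      simpa [hd] using this
    simp [List.dropWhile_cons, ha]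

lemma rstrip_idem (l : List Char) :
    PySem.Chars.rstrip (PySem.Chars.rstrip l) = PySem.Chars.rstrip l := by
  simp [PySem.Chars.rstrip, dropWhile_dropWhile]

lemma mem_rstrip {c : Char} {l : List Char} (h : c ∈ PySem.Chars.rstrip l) : c ∈ l := by
  simp only [PySem.Chars.rstrip, List.mem_reverse] at h
  simpa using mem_of_dropWhile h

lemma splitlines_go_no_nl (isB : Char → Bool) (h10 : isB '\n' = true)
    (s cur : List Char) (acc : List (List Char))
    (hc : ('\n':Char) ∉ cur) (ha : ∀ l ∈ acc, ('\n':Char) ∉ l) :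
    ∀ l ∈ PySem.Chars.splitlines.go isB s cur acc, ('\n':Char) ∉ l := by
  fun_induction PySem.Chars.splitlines.go isB s cur acc <;> simp_all
  · rename_i cur acc hcur
    rintro l (hl | rfl)
    · exact ha l hl
    · simpa using hc
  · rename_i c rest cur acc hx hB ih
    exact ih (by rintro rfl; simp [h10] at hB)

lemma splitlines_no_nl (s : List Char) : ∀ l ∈ PySem.Chars.splitlines s, ('\n' : Char) ∉ l := by
  exact splitlines_go_no_nl _ (by decide) s [] [] (by simp) (by simp)

lemma blank_iff {l : List Char} (hr : PySem.Chars.rstrip l = l) :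
    (PySem.Chars.strip l = [] ↔ l = []) := by
  constructor
  · intro h
    rw [← hr, rstrip_eq_nil_iff]
    exact (strip_eq_nil_iff l).mp h
  · rintro rfl
    rfl

-- A's loop as a stateless recursion: collapse runs of consecutive [] lines.
def ded : Bool → List (List Char) → List (List Char)
  | _, [] => []
  | b, l :: r => if l = [] then (if b then ded b r else [] :: ded true r) else l :: ded false r

lemma foldA_eq_ded (L : List (List Char)) (HB : ∀ l ∈ L, (PySem.Chars.strip l = [] ↔ l = [])) :
    ∀ (acc : List (List Char)) (pb : Bool),
      (L.foldl cleanStepA (acc, pb)).1 = acc ++ ded pb L := by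
  induction L with
  | nil => intro acc pb; simp [ded]
  | cons l r ih =>
    intro acc pb
    have hb : (PySem.Chars.strip l).isEmpty = decide (l = []) := by
      by_cases hl : l = []
      · subst hl
        simp [show PySem.Chars.strip ([] : List Char) = [] from rfl]
      · have hne : PySem.Chars.strip l ≠ [] := fun hs => hl ((HB l (by simp)).mp hs)
        simp [hl, hne]
    have HB' : ∀ x ∈ r, (PySem.Chars.strip x = [] ↔ x = []) := fun x hx => HB x (by simp [hx])
    by_cases hl : l = []
    · subst hl
      have hstrip : PySem.Chars.strip ([] : List Char) = [] := rfl
      cases pb with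
      | true =>
        have hstep : cleanStepA (acc, true) [] = (acc, true) := by
          simp [cleanStepA, hstrip]
        rw [List.foldl_cons, hstep, ih HB' acc true]
        simp [ded]
      | false =>
        have hstep : cleanStepA (acc, false) [] = (acc ++ [[]], true) := by
          simp [cleanStepA, hstrip]
        rw [List.foldl_cons, hstep, ih HB' (acc ++ [[]]) true]
        simp [ded]
    · simp only [List.foldl_cons, cleanStepA, hb]
      simp only [decide_eq_true_eq, hl]
      simpa [ded, hl] using ih HB' (acc ++ [l]) false

-- ded on replicated blanks and around them
lemma dedRepTrue (q : Nat) : ded true (List.replicate q []) = [] := by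
  induction q with
  | zero => rfl
  | succ q ih => simpa [List.replicate_succ, ded] using ih

lemma dedRepFalse (q : Nat) : ded false (List.replicate q []) = if q = 0 then [] else [[]] := by
  cases q with
  | zero => rfl
  | succ q => simp [List.replicate_succ, ded, dedRepTrue]

lemma ded_true_eq_false {X : List (List Char)} (hX : X.head? ≠ some []) :
    ded true X = ded false X := by
  cases X with
  | nil => rfl
  | cons a t =>
    have ha : a ≠ [] := fun h => hX (by simp [h])
    simp [ded, ha]

lemma dedLeadTrue (p : Nat) (X : List (List Char)) :
    ded true (List.replicate p [] ++ X) = ded true X := by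
  induction p with
  | zero => simp
  | succ p ih => simpa [List.replicate_succ, ded] using ih

lemma dedLead {X : List (List Char)} (hX : X.head? ≠ some []) (p : Nat) :
    ded false (List.replicate p [] ++ X) =
      (if p = 0 then [] else [[]]) ++ ded false X := by
  cases p with
  | zero => simp
  | succ p =>
    simp [List.replicate_succ, ded, dedLeadTrue, ded_true_eq_false hX]

lemma dedTrail {X : List (List Char)} (hne : X ≠ []) (hlast : X.getLast? ≠ some []) :
    ∀ (b : Bool) (q : Nat),
      ded b (X ++ List.replicate q []) = ded b X ++ (if q = 0 then [] else [[]]) := by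
  induction X with
  | nil => exact absurd rfl hne
  | cons a t ih =>
    intro b q
    cases t with
    | nil =>
      have ha : a ≠ [] := fun h => hlast (by simp [h])
      simp [ded, ha, dedRepFalse]
    | cons x t' =>
      have hlast' : (x :: t').getLast? ≠ some [] := by
        simpa [List.getLast?_cons_cons] using hlast
      by_cases ha : a = []
      · subst ha
        cases b with
        | true => simpa [ded] using ih (by simp) hlast' true q
        | false => simpa [ded] using ih (by simp) hlast' true q
      · simpa [ded, ha] using ih (by simp) hlast' false q

lemma ded_cons_ne {l : List Char} (hl : l ≠ []) (b : Bool) (r : List (List Char)) :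
    ded b (l :: r) = l :: ded false r := by
  simp [ded, hl]

lemma dedNeNil {X : List (List Char)} (hne : X ≠ []) (hX : X.head? ≠ some []) :
    ded false X ≠ [] := by
  cases X with
  | nil => exact absurd rfl hne
  | cons a t =>
    have ha : a ≠ [] := fun h => hX (by simp [h])
    simp [ded, ha]

-- join lemmas
lemma joinCons (l : List Char) {M : List (List Char)} (h : M ≠ []) :
    PySem.Chars.join ['\n'] (l :: M) = l ++ '\n' :: PySem.Chars.join ['\n'] M := by
  cases M with
  | nil => exact absurd rfl h
  | cons m t => simpa using PySem.Chars.join_cons_cons ['\n'] l m t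

lemma joinRepAll (n : Nat) :
    PySem.Chars.join ['\n'] (List.replicate (n + 1) []) = List.replicate n '\n' := by
  induction n with
  | zero => simp [PySem.Chars.join_singleton]
  | succ n ih =>
    rw [List.replicate_succ, joinCons _ (by simp), ih]
    simp [List.replicate_succ]

lemma joinRepLead {M : List (List Char)} (h : M ≠ []) (p : Nat) :
    PySem.Chars.join ['\n'] (List.replicate p [] ++ M) =
      List.replicate p '\n' ++ PySem.Chars.join ['\n'] M := by
  induction p with
  | zero => simp
  | succ p ih =>
    rw [List.replicate_succ, List.cons_append, joinCons _ (by simp [h]), ih]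
    simp [List.replicate_succ]

lemma joinRepTrail {M : List (List Char)} (h : M ≠ []) (q : Nat) :
    PySem.Chars.join ['\n'] (M ++ List.replicate q []) =
      PySem.Chars.join ['\n'] M ++ List.replicate q '\n' := by
  induction M with
  | nil => exact absurd rfl h
  | cons a t ih =>
    cases t with
    | nil =>
      cases q with
      | zero => simp
      | succ q =>
        rw [List.singleton_append, joinCons _ (by simp), joinRepAll]
        simp [PySem.Chars.join_singleton, List.replicate_succ]
    | cons x t' =>
      rw [List.cons_append, joinCons _ (by simp), joinCons _ (by simp), ih (by simp)]
      simp

lemma joinHead {a : List Char} (t : List (List Char)) (ha : a ≠ []) :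
    (PySem.Chars.join ['\n'] (a :: t)).head? = a.head? := by
  cases t with
  | nil => simp [PySem.Chars.join_singleton]
  | cons m t' =>
    rw [joinCons _ (by simp)]
    cases a with
    | nil => exact absurd rfl ha
    | cons c a' => simp

lemma mem_join_head {c : Char} {a : List Char} (t : List (List Char)) (hc : c ∈ a) :
    c ∈ PySem.Chars.join ['\n'] (a :: t) := by
  cases t with
  | nil => simpa [PySem.Chars.join_singleton] using hc
  | cons m t' =>
    rw [joinCons _ (by simp)]
    exact List.mem_append.mpr (Or.inl hc)

-- collapseNL lemmas
lemma bc_head_reset {s : List Char} (h : s.head? ≠ some '\n') (k : Nat) :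
    collapseNL s k = collapseNL s 0 := by
  cases s with
  | nil => rfl
  | cons c t =>
    have hc : c ≠ '\n' := fun hh => h (by simp [hh])
    simp [collapseNL, hc]

lemma bc_append_noNL {l : List Char} (hl : ('\n':Char) ∉ l) (hne : l ≠ []) (u : List Char) (k : Nat) :
    collapseNL (l ++ u) k = l ++ collapseNL u 0 := by
  induction l generalizing k with
  | nil => exact absurd rfl hne
  | cons c t ih =>
    have hc : c ≠ '\n' := fun h => hl (by simp [h])
    cases t with
    | nil => simp [collapseNL, hc]
    | cons x t' =>
      rw [List.cons_append]
      simp only [collapseNL, if_neg hc]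
      rw [ih (fun h => hl (by simp [h])) (by simp) 0]
      simp

lemma bc_skip {k : Nat} (hk : 2 ≤ k) (j : Nat) (s : List Char) :
    collapseNL (List.replicate j '\n' ++ s) k = collapseNL s k := by
  induction j with
  | zero => simp
  | succ j ih =>
    rw [List.replicate_succ, List.cons_append]
    simp [collapseNL, hk, ih]

lemma bc_rep1 {m : Nat} (hm : 1 ≤ m) {s : List Char} (hs : s.head? ≠ some '\n') :
    collapseNL (List.replicate m '\n' ++ s) 1 = '\n' :: collapseNL s 0 := by
  obtain ⟨j, rfl⟩ : ∃ j, m = j + 1 := ⟨m - 1, by omega⟩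
  rw [List.replicate_succ, List.cons_append]
  have h2 : ¬ ((2:Nat) ≤ 1) := by omega
  simp only [collapseNL, if_pos rfl, if_neg h2]
  rw [bc_skip (by omega) j s, bc_head_reset hs]
  simp

lemma bc_repOnly (q : Nat) : ∀ k, ∃ r, collapseNL (List.replicate q '\n') k = List.replicate r '\n' := by
  induction q with
  | zero => exact fun k => ⟨0, rfl⟩
  | succ q ih =>
    intro k
    rw [List.replicate_succ]
    by_cases hk : 2 ≤ k
    · obtain ⟨r, hr⟩ := ih k
      exact ⟨r, by simp [collapseNL, hk, hr]⟩
    · obtain ⟨r, hr⟩ := ih (k + 1)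
      exact ⟨r + 1, by simp [collapseNL, hk, hr, List.replicate_succ]⟩

lemma bc_lead {s : List Char} (hs : s.head? ≠ some '\n') (p : Nat) :
    ∀ k, ∃ r, collapseNL (List.replicate p '\n' ++ s) k =
      List.replicate r '\n' ++ collapseNL s 0 := by
  induction p with
  | zero => exact fun k => ⟨0, by simpa using bc_head_reset hs k⟩
  | succ p ih =>
    intro k
    rw [List.replicate_succ, List.cons_append]
    by_cases hk : 2 ≤ k
    · obtain ⟨r, hr⟩ := ih k
      exact ⟨r, by simp [collapseNL, hk, hr]⟩
    · obtain ⟨r, hr⟩ := ih (k + 1)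
      exact ⟨r + 1, by simp [collapseNL, hk, hr, List.replicate_succ]⟩

lemma bc_trail (s : List Char) : ∀ (k q : Nat),
    ∃ r, collapseNL (s ++ List.replicate q '\n') k = collapseNL s k ++ List.replicate r '\n' := by
  induction s with
  | nil =>
    intro k q
    obtain ⟨r, hr⟩ := bc_repOnly q k
    exact ⟨r, by simpa [collapseNL] using hr⟩
  | cons c t ih =>
    intro k q
    by_cases hc : c = '\n'
    · subst hc
      by_cases hk : 2 ≤ k
      · obtain ⟨r, hr⟩ := ih k q
        exact ⟨r, by simp [collapseNL, hk, hr]⟩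
      · obtain ⟨r, hr⟩ := ih (k + 1) q
        exact ⟨r, by simp [collapseNL, hk, hr]⟩
    · obtain ⟨r, hr⟩ := ih 0 q
      exact ⟨r, by simp [collapseNL, hc, hr]⟩

-- head of a nonblank-headed line list gives a non-newline head of the join
lemma joinHead_ne_nl {T : List (List Char)} (Hnl : ∀ l ∈ T, ('\n':Char) ∉ l)
    (hT : T.head? ≠ some []) (hne : T ≠ []) :
    (PySem.Chars.join ['\n'] T).head? ≠ some '\n' := by
  cases T with
  | nil => exact absurd rfl hne
  | cons a t =>
    have ha : a ≠ [] := fun h => hT (by simp [h])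
    rw [joinHead t ha]
    cases a with
    | nil => exact absurd rfl ha
    | cons c a' =>
      intro h
      exact Hnl (c :: a') (by simp) (by simp [show c = '\n' by simpa using h])

-- The core interior lemma: on a line list with non-blank first and last line,
-- collapsing newline runs in the join equals joining the deduplicated list.
lemma core : ∀ (n : Nat) (T : List (List Char)), T.length ≤ n →
    (∀ l ∈ T, ('\n':Char) ∉ l) → T.head? ≠ some [] → T.getLast? ≠ some [] → T ≠ [] →
    collapseNL (PySem.Chars.join ['\n'] T) 0 = PySem.Chars.join ['\n'] (ded false T) := by
  intro n
  induction n with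
  | zero =>
    intro T hlen _ _ _ hne
    cases T with
    | nil => exact absurd rfl hne
    | cons a t => simp at hlen
  | succ n IH =>
    intro T hlen Hnl hhead hlast hne
    obtain ⟨l, R, rfl⟩ : ∃ l R, T = l :: R := by
      cases T with
      | nil => exact absurd rfl hne
      | cons a t => exact ⟨a, t, rfl⟩
    have hl : l ≠ [] := fun h => hhead (by simp [h])
    have hlnl : ('\n':Char) ∉ l := Hnl l (by simp)
    cases R with
    | nil =>
      rw [PySem.Chars.join_singleton]
      have hcl : collapseNL l 0 = l := by
        simpa [collapseNL] using bc_append_noNL hlnl hl [] 0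
      rw [hcl]
      simp [ded, hl, PySem.Chars.join_singleton]
    | cons r0 rs =>
      have hRne : r0 :: rs ≠ [] := by simp
      have hlastR : (r0 :: rs).getLast? ≠ some [] := by
        rwa [List.getLast?_cons_cons] at hlast
      set R₁ := List.dropWhile (fun x => decide (x = [])) (r0 :: rs) with hR₁def
      set m := (List.takeWhile (fun (x : List Char) => decide (x = [])) (r0 :: rs)).length with hmdef
      have hsplit : r0 :: rs = List.replicate m [] ++ R₁ := by
        conv_lhs => rw [← List.takeWhile_append_dropWhile
          (p := fun (x : List Char) => decide (x = [])) (l := r0 :: rs)]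
        congr 1
        have hall : ∀ x ∈ List.takeWhile (fun (x : List Char) => decide (x = [])) (r0 :: rs),
            x = ([] : List Char) := fun x hx => by simpa using List.mem_takeWhile_imp hx
        exact List.eq_replicate_of_mem hall
      have hR₁ne : R₁ ≠ [] := by
        intro h
        have hall : ∀ x ∈ r0 :: rs, x = ([] : List Char) := by
          intro x hx
          simpa using List.dropWhile_eq_nil_iff.mp h x hx
        cases hgl : (r0 :: rs).getLast? with
        | none => simp [List.getLast?_eq_none_iff] at hgl
        | some x =>
          exact hlastR (by rw [hgl, hall x (List.mem_of_getLast? hgl)])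
      have hheadR₁ : R₁.head? ≠ some [] := by
        cases hR : R₁ with
        | nil => exact absurd hR hR₁ne
        | cons a t =>
          have ha : (fun (x : List Char) => decide (x = [])) a = false := by
            have := List.head_dropWhile_not (fun (x : List Char) => decide (x = []))
              (l := r0 :: rs) (by rw [← hR₁def, hR]; simp)
            simpa [← hR₁def, hR] using this
          simp only [decide_eq_false_iff_not] at ha
          simp [ha]
      have hlastR₁ : R₁.getLast? ≠ some [] := by
        rw [hsplit, List.getLast?_append_of_ne_nil _ hR₁ne] at hlastR
        exact hlastR
      have hlenR₁ : R₁.length ≤ n := by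
        have h1 : R₁.length ≤ (r0 :: rs).length := List.length_dropWhile_le _ _
        have h2 : (l :: r0 :: rs).length ≤ n + 1 := hlen
        simp only [List.length_cons] at h1 h2
        omega
      have HnlR₁ : ∀ x ∈ R₁, ('\n':Char) ∉ x := fun x hx =>
        Hnl x (List.mem_cons_of_mem l ((List.dropWhile_sublist _).subset hx))
      have IH₁ := IH R₁ hlenR₁ HnlR₁ hheadR₁ hlastR₁ hR₁ne
      have hheadJ : (PySem.Chars.join ['\n'] R₁).head? ≠ some '\n' :=
        joinHead_ne_nl HnlR₁ hheadR₁ hR₁ne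
      rw [joinCons l hRne, bc_append_noNL hlnl hl]
      have hcoll : collapseNL ('\n' :: PySem.Chars.join ['\n'] (r0 :: rs)) 0 =
          '\n' :: collapseNL (PySem.Chars.join ['\n'] (r0 :: rs)) 1 := by
        simp [collapseNL]
      rw [hcoll]
      have hjoinR : PySem.Chars.join ['\n'] (r0 :: rs) =
          List.replicate m '\n' ++ PySem.Chars.join ['\n'] R₁ := by
        conv_lhs => rw [hsplit]
        exact joinRepLead hR₁ne m
      by_cases hm : m = 0
      · have hRR : r0 :: rs = R₁ := by rw [hsplit, hm]; simp
        rw [hjoinR, hm]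
        simp only [List.replicate_zero, List.nil_append]
        rw [bc_head_reset hheadJ, IH₁]
        rw [ded_cons_ne hl false (r0 :: rs), hRR, joinCons l (dedNeNil hR₁ne hheadR₁)]
      · have hm1 : 1 ≤ m := by omega
        rw [hjoinR, bc_rep1 hm1 hheadJ, IH₁]
        have h2 : ded false (r0 :: rs) = [[]] ++ ded false R₁ := by
          conv_lhs => rw [hsplit]
          rw [dedLead hheadR₁ m, if_neg hm]
        rw [ded_cons_ne hl false (r0 :: rs), h2, List.singleton_append,
          joinCons l (by simp), joinCons ([] : List Char) (dedNeNil hR₁ne hheadR₁)]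
        simp

-- strip boundary lemmas
lemma dropWhile_sp_rep (n : Nat) :
    List.dropWhile PySem.Chars.isspace (List.replicate n '\n') = [] := by
  rw [List.dropWhile_eq_nil_iff]
  intro x hx
  rw [List.eq_of_mem_replicate hx]
  decide

lemma lstrip_rep (a : Nat) (x : List Char) :
    PySem.Chars.lstrip (List.replicate a '\n' ++ x) = PySem.Chars.lstrip x := by
  simp only [PySem.Chars.lstrip]
  rw [List.dropWhile_append, dropWhile_sp_rep]
  simp

lemma rstrip_rep (y : List Char) (b : Nat) :
    PySem.Chars.rstrip (y ++ List.replicate b '\n') = PySem.Chars.rstrip y := by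
  simp only [PySem.Chars.rstrip, List.reverse_append, List.reverse_replicate]
  rw [List.dropWhile_append, dropWhile_sp_rep]
  simp

lemma strip_boundary {m : List Char} (hm : PySem.Chars.lstrip m ≠ []) (a b : Nat) :
    PySem.Chars.strip (List.replicate a '\n' ++ (m ++ List.replicate b '\n')) =
      PySem.Chars.strip m := by
  rw [PySem.Chars.strip, PySem.Chars.strip, lstrip_rep]
  have : PySem.Chars.lstrip (m ++ List.replicate b '\n') =
      PySem.Chars.lstrip m ++ List.replicate b '\n' := by
    simp only [PySem.Chars.lstrip]
    rw [List.dropWhile_append,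
      if_neg (by simpa [List.isEmpty_iff, PySem.Chars.lstrip] using hm)]
  rw [this, rstrip_rep]

lemma dropWhile_cons_head_false {α : Type} (p : α → Bool) (X : List α) (a : α) (t : List α)
    (hD : X.dropWhile p = a :: t) : p a = false := by
  induction X with
  | nil => simp at hD
  | cons x xs ih =>
    rw [List.dropWhile_cons] at hD
    by_cases hx : p x
    · exact ih (by simpa [hx] using hD)
    · obtain ⟨rfl, rfl⟩ : x = a ∧ xs = t := by simpa [hx] using hD
      simpa using hx

lemma head?_dropWhile_blank (X : List (List Char))
    (h : X.dropWhile (fun (x : List Char) => decide (x = [])) ≠ []) :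
    (X.dropWhile (fun (x : List Char) => decide (x = []))).head? ≠ some [] := by
  cases hD : X.dropWhile (fun (x : List Char) => decide (x = [])) with
  | nil => exact absurd hD h
  | cons a t =>
    have ha : a ≠ [] := by
      simpa using dropWhile_cons_head_false _ X a t hD
    simp [ha]

-- main key lemma: A's pipeline equals B's pipeline on any rstripped line list
lemma key (L : List (List Char)) (Hnl : ∀ l ∈ L, ('\n':Char) ∉ l)
    (Hr : ∀ l ∈ L, PySem.Chars.rstrip l = l) :
    PySem.Chars.strip (PySem.Chars.join ['\n'] (ded false L)) =
      PySem.Chars.strip (collapseNL (PySem.Chars.join ['\n'] L) 0) := by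
  by_cases hall : ∀ l ∈ L, l = []
  · by_cases hLnil : L = []
    · subst hLnil
      rfl
    · have hrep : L = List.replicate L.length [] := List.eq_replicate_of_mem hall
      obtain ⟨k, hk⟩ : ∃ k, L.length = k + 1 := by
        cases L with
        | nil => exact absurd rfl hLnil
        | cons a t => exact ⟨t.length, by simp⟩
      rw [hrep, hk, dedRepFalse, if_neg (Nat.succ_ne_zero _), PySem.Chars.join_singleton,
        joinRepAll]
      obtain ⟨r, hr⟩ := bc_repOnly k 0
      rw [hr]
      have h2 : PySem.Chars.strip (List.replicate r '\n') = [] :=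
        (strip_eq_nil_iff _).mpr (fun c hc => by rw [List.eq_of_mem_replicate hc]; decide)
      rw [h2]
      rfl
  · push_neg at hall
    set T₁ := List.dropWhile (fun (x : List Char) => decide (x = [])) L with hT₁def
    set p := (List.takeWhile (fun (x : List Char) => decide (x = [])) L).length with hpdef
    have hT₁ne : T₁ ≠ [] := by
      intro h
      obtain ⟨l, hlL, hlne⟩ := hall
      exact hlne (by simpa using List.dropWhile_eq_nil_iff.mp h l hlL)
    have hsplitL : L = List.replicate p [] ++ T₁ := by
      conv_lhs => rw [← List.takeWhile_append_dropWhile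
        (p := fun (x : List Char) => decide (x = [])) (l := L)]
      congr 1
      exact List.eq_replicate_of_mem (fun x hx => by simpa using List.mem_takeWhile_imp hx)
    set T := (List.dropWhile (fun (x : List Char) => decide (x = [])) T₁.reverse).reverse
      with hTdef
    set q := (List.takeWhile (fun (x : List Char) => decide (x = [])) T₁.reverse).length
      with hqdef
    have hheadT₁ : T₁.head? ≠ some [] := by
      rw [hT₁def]
      exact head?_dropWhile_blank L (by rw [← hT₁def]; exact hT₁ne)
    have hsplitT₁ : T₁ = T ++ List.replicate q [] := by
      conv_lhs => rw [← List.reverse_reverse T₁, ← List.takeWhile_append_dropWhile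
        (p := fun (x : List Char) => decide (x = [])) (l := T₁.reverse)]
      rw [List.reverse_append, hTdef]
      congr 1
      rw [List.eq_replicate_of_mem
        (fun x hx => by simpa using List.mem_takeWhile_imp hx : ∀ x ∈ List.takeWhile
          (fun (x : List Char) => decide (x = [])) T₁.reverse, x = ([] : List Char)),
        List.reverse_replicate]
    have hTrevne : List.dropWhile (fun (x : List Char) => decide (x = [])) T₁.reverse ≠ [] := by
      intro h
      have hallT : ∀ x ∈ T₁.reverse, x = ([] : List Char) := by
        intro x hx
        simpa using List.dropWhile_eq_nil_iff.mp h x hx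
      cases hT : T₁ with
      | nil => exact hT₁ne hT
      | cons a t =>
        exact hheadT₁ (by rw [hT, hallT a (by simp [hT])]; simp)
    have hTne : T ≠ [] := by
      rw [hTdef]
      simpa using hTrevne
    have hheadT : T.head? ≠ some [] := by
      obtain ⟨a, t, hT⟩ := List.exists_cons_of_ne_nil hTne
      have hh : T₁.head? = some a := by
        rw [hsplitT₁, hT]
        simp
      intro hcon
      rw [show a = ([] : List Char) by simpa [hT] using hcon] at hh
      exact hheadT₁ hh
    have hlastT : T.getLast? ≠ some [] := by
      rw [← List.head?_reverse, hTdef, List.reverse_reverse]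
      exact head?_dropWhile_blank T₁.reverse hTrevne
    have hLrw : L = List.replicate p [] ++ (T ++ List.replicate q []) := by
      rw [hsplitL, hsplitT₁]
    have hTsub : ∀ x ∈ T, x ∈ L := by
      intro x hx
      rw [hLrw]
      exact List.mem_append.mpr (Or.inr (List.mem_append.mpr (Or.inl hx)))
    have HnlT : ∀ x ∈ T, ('\n':Char) ∉ x := fun x hx => Hnl x (hTsub x hx)
    have hDne : ded false T ≠ [] := dedNeNil hTne hheadT
    -- the deduplicated core contains a non-whitespace character
    have hlst : PySem.Chars.lstrip (PySem.Chars.join ['\n'] (ded false T)) ≠ [] := by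
      obtain ⟨a, t, hT⟩ := List.exists_cons_of_ne_nil hTne
      have ha : a ≠ [] := by
        intro h
        exact hheadT (by rw [hT, h]; simp)
      have hra : PySem.Chars.rstrip a = a := Hr a (hTsub a (by simp [hT]))
      have hsa : PySem.Chars.strip a ≠ [] := fun h => ha ((blank_iff hra).mp h)
      obtain ⟨c, hca, hcsp⟩ : ∃ c ∈ a, ¬ PySem.Chars.isspace c = true := by
        by_contra hcon
        push_neg at hcon
        exact hsa ((strip_eq_nil_iff a).mpr hcon)
      have hcj : c ∈ PySem.Chars.join ['\n'] (ded false T) := by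
        rw [hT, ded_cons_ne ha false t]
        exact mem_join_head _ hca
      intro h
      exact hcsp ((List.dropWhile_eq_nil_iff.mp
        (by simpa [PySem.Chars.lstrip] using h)) c hcj)
    -- A side
    have hheadTR : (T ++ List.replicate q []).head? ≠ some [] := by
      obtain ⟨a, t, hT⟩ := List.exists_cons_of_ne_nil hTne
      have ha : a ≠ [] := by
        intro h
        exact hheadT (by rw [hT, h]; simp)
      simp [hT, ha]
    have hA : ded false L = List.replicate (if p = 0 then 0 else 1) [] ++
        (ded false T ++ List.replicate (if q = 0 then 0 else 1) []) := by
      rw [hLrw, dedLead hheadTR p, dedTrail hTne hlastT false q]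
      congr 1
      · split_ifs <;> simp
      · congr 1
        split_ifs <;> simp
    have hjoinA : PySem.Chars.join ['\n'] (ded false L) =
        List.replicate (if p = 0 then 0 else 1) '\n' ++
          (PySem.Chars.join ['\n'] (ded false T) ++
            List.replicate (if q = 0 then 0 else 1) '\n') := by
      rw [hA, joinRepLead (by simp [hDne]) _, joinRepTrail hDne _]
    rw [hjoinA, strip_boundary hlst]
    -- B side
    have hjoinB : PySem.Chars.join ['\n'] L =
        List.replicate p '\n' ++ (PySem.Chars.join ['\n'] T ++ List.replicate q '\n') := by
      rw [hLrw, joinRepLead (by simp [hTne]) p, joinRepTrail hTne q]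
    rw [hjoinB]
    have hheadJT : (PySem.Chars.join ['\n'] T).head? ≠ some '\n' :=
      joinHead_ne_nl HnlT hheadT hTne
    obtain ⟨r2, hr2⟩ := bc_trail (List.replicate p '\n' ++ PySem.Chars.join ['\n'] T) 0 q
    obtain ⟨r1, hr1⟩ := bc_lead hheadJT p 0
    rw [show List.replicate p '\n' ++ (PySem.Chars.join ['\n'] T ++ List.replicate q '\n') =
        (List.replicate p '\n' ++ PySem.Chars.join ['\n'] T) ++ List.replicate q '\n' by
      simp [List.append_assoc]]
    rw [hr2, hr1, core T.length T le_rfl HnlT hheadT hlastT hTne, List.append_assoc,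
      strip_boundary hlst]

-- ===== VERDICT (by name: the statement is the Claim_ definition above) =====
theorem clean_multiline_py_spec : Claim_equal_clean_multiline_py := by
  intro value _
  unfold Spec_clean_multiline_py clean_multiline_py clean_multiline_py_alt
  set rlines := (PySem.Chars.splitlines value.toList).map PySem.Chars.rstrip with hrl
  have Hr : ∀ l ∈ rlines, PySem.Chars.rstrip l = l := by
    intro l hl
    obtain ⟨l0, _, rfl⟩ := List.mem_map.mp hl
    exact rstrip_idem l0
  have Hnl : ∀ l ∈ rlines, ('\n':Char) ∉ l := by
    intro l hl hc
    obtain ⟨l0, hl0, rfl⟩ := List.mem_map.mp hl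
    exact splitlines_no_nl value.toList l0 hl0 (mem_rstrip hc)
  have HB : ∀ l ∈ rlines, (PySem.Chars.strip l = [] ↔ l = []) :=
    fun l hl => blank_iff (Hr l hl)
  have hfold := foldA_eq_ded rlines HB [] false
  simp only [List.nil_append] at hfold
  simp only [hfold]
  exact congrArg String.ofList (key rlines Hnl Hr)
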